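-- pv_equiv track=rewrite | github.com/schaeferbasti/tabarena_fork_fs | bencheval/bencheval/website_format.py | rename_map
-- ===== SOURCE A (Python) =====
-- def rename_map(model_name: str) -> str:
--     rename_map = {
--         "TABM": "TabM",
--         "REALMLP": "RealMLP",
--         "GBM": "LightGBM",
--         "CAT": "CatBoost",
--         "XGB": "XGBoost",
--         "XT": "ExtraTrees",
--         "RF": "RandomForest",
--         "MNCA": "ModernNCA",
--         "NN_TORCH": "TorchMLP",
--         "FASTAI": "FastaiMLP",
--         "TABPFNV2": "TabPFNv2",
--         "EBM": "EBM",
--         "TABDPT": "TabDPT",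
--         "TABICL": "TabICL",
--         "KNN": "KNN",
--         "LR": "Linear",
--         "MITRA": "Mitra",
--         "LIMIX": "LimiX",
--         "XRFM": "xRFM",
--         "TABFLEX": "TabFlex",
--         "BETA": "BetaTabPFN",
--         "REALTABPFN-V2.5": "RealTabPFN-v2.5",
--     }
--
--     # Sort keys by descending length so longest prefixes are matched first
--     for prefix in sorted(rename_map, key=len, reverse=True):
--         if model_name.startswith(prefix):
--             if model_name == prefix:
--                 return rename_map[prefix]
--             return model_name.replace(prefix, rename_map[prefix], 1)
--
--     return model_name
-- ===== SOURCE B (Python) =====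
-- def rename_map(model_name: str) -> str:
--     rename_map = {
--         "TABM": "TabM",
--         "REALMLP": "RealMLP",
--         "GBM": "LightGBM",
--         "CAT": "CatBoost",
--         "XGB": "XGBoost",
--         "XT": "ExtraTrees",
--         "RF": "RandomForest",
--         "MNCA": "ModernNCA",
--         "NN_TORCH": "TorchMLP",
--         "FASTAI": "FastaiMLP",
--         "TABPFNV2": "TabPFNv2",
--         "EBM": "EBM",
--         "TABDPT": "TabDPT",
--         "TABICL": "TabICL",
--         "KNN": "KNN",
--         "LR": "Linear",
--         "MITRA": "Mitra",
--         "LIMIX": "LimiX",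
--         "XRFM": "xRFM",
--         "TABFLEX": "TabFlex",
--         "BETA": "BetaTabPFN",
--         "REALTABPFN-V2.5": "RealTabPFN-v2.5",
--     }
--
--     # Single pass: keep the longest matching prefix; no sort, no equality special case.
--     best = None
--     for prefix in rename_map:
--         if model_name.startswith(prefix) and (best is None or len(prefix) > len(best)):
--             best = prefix
--     if best is None:
--         return model_name
--     return rename_map[best] + model_name[len(best):]
-- ===== Notes on version B (the rewrite author's own statement) =====
-- stated objective: simpler
-- what changed: Replaced the sort-keys-by-descending-length-then-first-prefix-match loop (with a redundant exact-equality special case) by one unsorted pass maintaining the longest matching prefix, followed by a single concatenation of the mapped name with the suffix.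
import Mathlib
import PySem

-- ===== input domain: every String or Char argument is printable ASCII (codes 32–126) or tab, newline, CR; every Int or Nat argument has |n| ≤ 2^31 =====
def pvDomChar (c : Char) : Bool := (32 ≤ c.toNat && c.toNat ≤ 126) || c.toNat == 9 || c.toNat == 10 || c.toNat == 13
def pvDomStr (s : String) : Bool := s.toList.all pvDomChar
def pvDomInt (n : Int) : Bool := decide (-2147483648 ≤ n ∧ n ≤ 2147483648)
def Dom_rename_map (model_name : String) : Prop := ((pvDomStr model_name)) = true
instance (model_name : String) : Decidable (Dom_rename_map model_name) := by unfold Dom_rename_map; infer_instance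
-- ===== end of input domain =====

-- B replaces A's sort-by-descending-length-then-first-match loop (and its redundant exact-equality
-- special case) by one unsorted pass keeping the longest matching prefix; objective: simpler.

-- the dict literal shared by both programs (insertion order)
def pvItems : List (String × String) :=
  [("TABM", "TabM"), ("REALMLP", "RealMLP"), ("GBM", "LightGBM"), ("CAT", "CatBoost"),
   ("XGB", "XGBoost"), ("XT", "ExtraTrees"), ("RF", "RandomForest"), ("MNCA", "ModernNCA"),
   ("NN_TORCH", "TorchMLP"), ("FASTAI", "FastaiMLP"), ("TABPFNV2", "TabPFNv2"), ("EBM", "EBM"),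
   ("TABDPT", "TabDPT"), ("TABICL", "TabICL"), ("KNN", "KNN"), ("LR", "Linear"),
   ("MITRA", "Mitra"), ("LIMIX", "LimiX"), ("XRFM", "xRFM"), ("TABFLEX", "TabFlex"),
   ("BETA", "BetaTabPFN"), ("REALTABPFN-V2.5", "RealTabPFN-v2.5")]

-- ===== PORT A =====
-- hand port of s.replace(old, new, 1): exact — replaces the FIRST occurrence of old (found via
-- str.find semantics; old = "" is found at index 0, as in Python), or returns s if absent
def pvReplace1 (s old new : String) : String :=
  let i := PySem.Str.find s old
  if i = -1 then s
  else String.ofList (s.toList.take i.toNat ++ new.toList ++ s.toList.drop (i.toNat + old.toList.length))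

-- A's for-loop over the sorted key list
def pvALoop (model_name : String) (d : PySem.Dict String String) : List String → String
  | [] => model_name
  | prefx :: rest =>
    if PySem.Str.startswith model_name prefx then
      if model_name = prefx then d.getD prefx ""
      else pvReplace1 model_name prefx (d.getD prefx "")
    else pvALoop model_name d rest

def rename_map (model_name : String) : String :=
  let d : PySem.Dict String String := PySem.Dict.ofList pvItems
  pvALoop model_name d (PySem.List.sorted d.keys (fun k => PySem.Str.len k) true)

-- ===== PORT B =====
-- B's loop body: keep the longest prefix of model_name seen so far
def pvBStep (model_name : String) (best : Option String) (prefx : String) : Option String :=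
  if PySem.Str.startswith model_name prefx &&
      (match best with
       | none => true
       | some b => decide (PySem.Str.len b < PySem.Str.len prefx))
  then some prefx else best

def rename_map_alt (model_name : String) : String :=
  let d : PySem.Dict String String := PySem.Dict.ofList pvItems
  match d.keys.foldl (pvBStep model_name) none with
  | none => model_name
  | some b => d.getD b "" ++ PySem.Str.slice model_name (some (PySem.Str.len b : Int)) none

-- ===== PRECONDITION & SPEC =====
def Spec_rename_map (model_name : String) (out : String) : Prop := out = rename_map_alt model_name
instance (model_name : String) (out : String) : Decidable (Spec_rename_map model_name out) := by unfold Spec_rename_map; infer_instance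

-- ===== CLAIM (what is proved, stated in full; the proofs are below) =====
def Claim_equal_rename_map : Prop := ∀ (model_name : String), Dom_rename_map model_name → Spec_rename_map model_name (rename_map model_name)

-- ===== LEMMAS AND PROOFS =====

-- two prefixes of the same string with equal length are equal
theorem pv_prefix_unique {m p q : String} (hp : p.toList <+: m.toList)
    (hq : q.toList <+: m.toList) (h : p.toList.length = q.toList.length) : p = q := by
  have h1 : p.toList <+: q.toList := List.prefix_of_prefix_length_le hp hq h.le
  exact String.toList_inj.mp (List.IsPrefix.eq_of_length h1 h)

-- startswith as a prefix statement
theorem pv_startswith_iff (m p : String) :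
    PySem.Str.startswith m p = true ↔ p.toList <+: m.toList := by
  rw [PySem.Str.startswith_eq, PySem.Chars.startswith_iff]

-- a prefix is found at index 0 by str.find
theorem pv_find_zero (s sub : String) (h : sub.toList <+: s.toList) : PySem.Str.find s sub = 0 := by
  rw [PySem.Str.find_eq]
  have hnn : 0 ≤ PySem.Chars.find s.toList sub.toList :=
    (PySem.Chars.find_nonneg_iff _ _).mpr h.isInfix
  obtain ⟨h1, h2⟩ := PySem.Chars.find_spec hnn
  have h0 : (PySem.Chars.find s.toList sub.toList).toNat = 0 := by
    by_contra hne
    exact h2 0 (Nat.pos_of_ne_zero hne) (by simpa using h)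
  omega

-- A-side: no key matches ⇒ the loop falls through
theorem pv_aLoop_none (m : String) (d : PySem.Dict String String) (ks : List String)
    (h : ∀ p ∈ ks, PySem.Str.startswith m p = false) : pvALoop m d ks = m := by
  induction ks with
  | nil => rfl
  | cons a t ih =>
    have ha : ¬ PySem.Str.startswith m a = true := ne_true_of_eq_false (h a (by simp))
    simp only [pvALoop]
    rw [if_neg ha]
    exact ih (fun p hp => h p (by simp [hp]))

-- A-side: some key matches; the loop stops at a match of maximal length
theorem pv_aLoop_some (m : String) (d : PySem.Dict String String) (ks : List String)
    (hpw : ks.Pairwise (fun a b => PySem.Str.len b ≤ PySem.Str.len a))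
    (p0 : String) (hp0 : p0 ∈ ks) (hm0 : PySem.Str.startswith m p0 = true) :
    ∃ p, p ∈ ks ∧ PySem.Str.startswith m p = true ∧
      (∀ q ∈ ks, PySem.Str.startswith m q = true → PySem.Str.len q ≤ PySem.Str.len p) ∧
      pvALoop m d ks = (if m = p then d.getD p "" else pvReplace1 m p (d.getD p "")) := by
  induction ks with
  | nil => simp at hp0
  | cons a t ih =>
    rcases List.pairwise_cons.mp hpw with ⟨ha, hpw'⟩
    by_cases hsa : PySem.Str.startswith m a = true
    · refine ⟨a, by simp, hsa, ?_, ?_⟩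
      · intro q hq hmq
        rcases List.mem_cons.mp hq with rfl | hq
        · exact le_refl _
        · exact ha q hq
      · simp only [pvALoop]
        rw [if_pos hsa]
    · have hp0' : p0 ∈ t := by
        rcases List.mem_cons.mp hp0 with rfl | h
        · exact absurd hm0 hsa
        · exact h
      obtain ⟨p, hpmem, hpm, hmax, heq⟩ := ih hpw' hp0'
      refine ⟨p, by simp [hpmem], hpm, ?_, ?_⟩
      · intro q hq hmq
        rcases List.mem_cons.mp hq with rfl | hq
        · exact absurd hmq hsa
        · exact hmax q hq hmq
      · simp only [pvALoop]
        rw [if_neg hsa]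
        exact heq

-- B-side: no key matches ⇒ the fold is the identity
theorem pv_bfold_id (m : String) (l : List String) (init : Option String)
    (h : ∀ p ∈ l, PySem.Str.startswith m p = false) :
    l.foldl (pvBStep m) init = init := by
  induction l generalizing init with
  | nil => rfl
  | cons a t ih =>
    have ha := h a (by simp)
    rw [List.foldl_cons]
    have hstep : pvBStep m init a = init := by
      simp only [pvBStep, ha, Bool.false_and, Bool.false_eq_true, if_false]
    rw [hstep]
    exact ih init (fun p hp => h p (by simp [hp]))

-- B-side: the best only grows
theorem pv_bfold_mono (m : String) (l : List String) :
    ∀ b0 : String, ∃ b, l.foldl (pvBStep m) (some b0) = some b ∧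
      PySem.Str.len b0 ≤ PySem.Str.len b := by
  induction l with
  | nil => exact fun b0 => ⟨b0, rfl, le_refl _⟩
  | cons a t ih =>
    intro b0
    by_cases hc : (PySem.Str.startswith m a &&
        decide (PySem.Str.len b0 < PySem.Str.len a)) = true
    · have hlt : PySem.Str.len b0 < PySem.Str.len a :=
        of_decide_eq_true ((Bool.and_eq_true _ _).mp hc).2
      have hstep : pvBStep m (some b0) a = some a := by
        simp only [pvBStep]; rw [if_pos hc]
      obtain ⟨b, hb, hle⟩ := ih a
      exact ⟨b, by rw [List.foldl_cons, hstep]; exact hb, le_trans hlt.le hle⟩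
    · have hstep : pvBStep m (some b0) a = some b0 := by
        simp only [pvBStep]; rw [if_neg hc]
      obtain ⟨b, hb, hle⟩ := ih b0
      exact ⟨b, by rw [List.foldl_cons, hstep]; exact hb, hle⟩

-- B-side: a some-result matches and comes from the list (or from init)
theorem pv_bfold_some_mem (m : String) (l : List String) :
    ∀ (init : Option String) (b : String), l.foldl (pvBStep m) init = some b →
      init = some b ∨ (b ∈ l ∧ PySem.Str.startswith m b = true) := by
  induction l with
  | nil => exact fun init b h => Or.inl h
  | cons a t ih =>
    intro init b h
    rw [List.foldl_cons] at h
    rcases ih _ b h with hstep | ⟨hmem, hsw⟩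
    · cases init with
      | none =>
        cases hsw : PySem.Str.startswith m a with
        | false =>
          have hid : pvBStep m none a = none := by
            simp only [pvBStep, hsw, Bool.false_and, Bool.false_eq_true, if_false]
          rw [hid] at hstep
          exact absurd hstep (by simp)
        | true =>
          have h2 : some a = some b := by
            rw [← hstep]; simp only [pvBStep, hsw, Bool.true_and]; rfl
          cases Option.some.inj h2
          exact Or.inr ⟨by simp, hsw⟩
      | some b0 =>
        by_cases hc : (PySem.Str.startswith m a &&
            decide (PySem.Str.len b0 < PySem.Str.len a)) = true
        · have h2 : some a = some b := by
            rw [← hstep]; simp only [pvBStep]; rw [if_pos hc]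
          cases Option.some.inj h2
          exact Or.inr ⟨by simp, ((Bool.and_eq_true _ _).mp hc).1⟩
        · have h2 : some b0 = some b := by
            rw [← hstep]; simp only [pvBStep]; rw [if_neg hc]
          exact Or.inl h2
    · exact Or.inr ⟨by simp [hmem], hsw⟩

-- B-side: every matching key is dominated by the final best
theorem pv_bfold_dom (m : String) (l : List String) :
    ∀ (init : Option String) (p : String), p ∈ l → PySem.Str.startswith m p = true →
      ∃ b, l.foldl (pvBStep m) init = some b ∧ PySem.Str.len p ≤ PySem.Str.len b := by
  induction l with
  | nil => intro _ p hp; simp at hp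
  | cons a t ih =>
    intro init p hp hm
    rcases List.mem_cons.mp hp with rfl | hp'
    · -- p = a : after this step the accumulator dominates a
      have hkey : ∃ c, pvBStep m init p = some c ∧ PySem.Str.len p ≤ PySem.Str.len c := by
        cases init with
        | none =>
          refine ⟨p, ?_, le_refl _⟩
          simp only [pvBStep, hm, Bool.true_and]
          rfl
        | some b0 =>
          by_cases hlt : PySem.Str.len b0 < PySem.Str.len p
          · refine ⟨p, ?_, le_refl _⟩
            simp only [pvBStep, hm, Bool.true_and]
            rw [if_pos (decide_eq_true hlt)]
          · refine ⟨b0, ?_, not_lt.mp hlt⟩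
            simp only [pvBStep, hm, Bool.true_and]
            rw [if_neg]
            simpa using hlt
      obtain ⟨c, hc, hlec⟩ := hkey
      obtain ⟨b, hb, hleb⟩ := pv_bfold_mono m t c
      exact ⟨b, by rw [List.foldl_cons, hc]; exact hb, le_trans hlec hleb⟩
    · rw [List.foldl_cons]
      exact ih (pvBStep m init a) p hp' hm

-- the two output formulas agree on a matching prefix
theorem pv_out_eq (m p v : String) (h : p.toList <+: m.toList) :
    (if m = p then v else pvReplace1 m p v) =
      v ++ PySem.Str.slice m (some (PySem.Str.len p : Int)) none := by
  by_cases he : m = p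
  · subst he
    rw [if_pos rfl]
    apply String.toList_inj.mp
    simp
  · rw [if_neg he]
    have hf : PySem.Chars.find m.toList p.toList = 0 := by
      have h0 := pv_find_zero m p h
      rwa [PySem.Str.find_eq] at h0
    apply String.toList_inj.mp
    simp [pvReplace1, hf]

-- ===== VERDICT (by name: the statement is the Claim_ definition above) =====
theorem rename_map_spec : Claim_equal_rename_map := by
  intro m _
  unfold Spec_rename_map rename_map rename_map_alt
  dsimp only
  by_cases hno : ∀ p ∈ (PySem.Dict.ofList pvItems : PySem.Dict String String).keys,
      PySem.Str.startswith m p = false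
  · rw [pv_aLoop_none m _ _ (fun p hp => hno p ((PySem.List.mem_sorted _ _ _ _).mp hp)),
       pv_bfold_id m _ none hno]
  · push_neg at hno
    obtain ⟨p0, hp0, hne0⟩ := hno
    have hm0 : PySem.Str.startswith m p0 = true := by
      cases h : PySem.Str.startswith m p0
      · exact absurd h hne0
      · rfl
    have hpw := PySem.List.sorted_pairwise_rev
      (PySem.Dict.ofList pvItems : PySem.Dict String String).keys (fun k => PySem.Str.len k)
    obtain ⟨pA, hpAmem, hpAm, hpAmax, hAeq⟩ :=
      pv_aLoop_some m (PySem.Dict.ofList pvItems) _ hpw p0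
        ((PySem.List.mem_sorted _ _ _ _).mpr hp0) hm0
    have hpAkeys : pA ∈ (PySem.Dict.ofList pvItems : PySem.Dict String String).keys :=
      (PySem.List.mem_sorted _ _ _ _).mp hpAmem
    obtain ⟨b, hbfold, hdom⟩ := pv_bfold_dom m _ none pA hpAkeys hpAm
    rcases pv_bfold_some_mem m _ none b hbfold with hbad | ⟨hbmem, hbm⟩
    · exact absurd hbad (by simp)
    have hble : PySem.Str.len b ≤ PySem.Str.len pA :=
      hpAmax b ((PySem.List.mem_sorted _ _ _ _).mpr hbmem) hbm
    have hlen : pA.toList.length = b.toList.length := by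
      have hab := le_antisymm hdom hble
      simpa using hab
    have hpb : pA = b :=
      pv_prefix_unique ((pv_startswith_iff m pA).mp hpAm) ((pv_startswith_iff m b).mp hbm) hlen
    rw [hAeq, hbfold]
    subst hpb
    dsimp only
    exact pv_out_eq m pA ((PySem.Dict.ofList pvItems : PySem.Dict String String).getD pA "")
      ((pv_startswith_iff m pA).mp hpAm)
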